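-- pv_equiv track=rewrite | github.com/eiancarter/cs-sprint-challenge-hash-tables | hashtables/ex4/ex4.py | has_negatives
-- ===== SOURCE A (Python) =====
-- def has_negatives(a):
--     """
--     YOUR CODE HERE
--     """
--     numbers = dict()
--     negatives = []
--     for number in a:
--         if number not in numbers and number < 0:
--             numbers[abs(number)] = number
--     for num in a:
--         if num in numbers:
--             negatives.append(num)
--
--     return negatives
-- ===== SOURCE B (Python) =====
-- def has_negatives(a):
--     # Sort the distinct values, then sweep two pointers from both ends to
--     # find x/-x pairs; finally emit the elements of a that were paired.
--     vals = sorted(set(a))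
--     found = set()
--     i, j = 0, len(vals) - 1
--     while i < j:
--         s = vals[i] + vals[j]
--         if s == 0:
--             found.add(vals[j])
--             i += 1
--             j -= 1
--         elif s < 0:
--             i += 1
--         else:
--             j -= 1
--     return [x for x in a if x in found]
-- ===== Notes on version B (the rewrite author's own statement) =====
-- stated objective: alternative
-- what changed: Replaces A's hash-index pass (dict of negatives keyed by absolute value) with a comparison-based algorithm: sort the distinct values and sweep two pointers inward from both ends to collect the x/-x pairs, then emit the matching elements of a.
import Mathlib
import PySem

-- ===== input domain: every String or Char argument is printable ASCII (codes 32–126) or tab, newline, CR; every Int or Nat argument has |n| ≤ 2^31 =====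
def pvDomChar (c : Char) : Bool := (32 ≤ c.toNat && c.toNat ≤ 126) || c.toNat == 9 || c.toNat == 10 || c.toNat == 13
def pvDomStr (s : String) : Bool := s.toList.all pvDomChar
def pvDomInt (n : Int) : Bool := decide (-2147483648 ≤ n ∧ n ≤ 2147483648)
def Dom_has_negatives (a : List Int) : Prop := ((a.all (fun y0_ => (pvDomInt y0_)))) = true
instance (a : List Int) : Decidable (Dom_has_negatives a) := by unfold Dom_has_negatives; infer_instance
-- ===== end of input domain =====

-- B replaces A's hash index of negatives with a sort-and-two-pointer sweep over the distinct values (alternative algorithm, similar cost).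


-- ===== PORT A =====
-- first loop: build dict {abs(number): number} for negative numbers not already keys
def hnStep (d : PySem.Dict Int Int) (number : Int) : PySem.Dict Int Int :=
  if !(d.contains number) && decide (number < 0) then d.insert |number| number else d

def has_negatives (a : List Int) : List Int :=
  let numbers := a.foldl hnStep PySem.Dict.empty
  a.foldl (fun negatives num => if numbers.contains num then negatives ++ [num] else negatives) []

-- ===== PORT B =====
-- the while loop: i, j move inward; vals[i] / vals[j] are exact via getD since 0 ≤ i < j < vals.length whenever the body runs
def twoPtr (vals : List Int) (i j : Nat) (found : PySem.Set Int) : PySem.Set Int :=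
  if i < j then
    let s := vals.getD i 0 + vals.getD j 0
    if s = 0 then twoPtr vals (i + 1) (j - 1) (found.add (vals.getD j 0))
    else if s < 0 then twoPtr vals (i + 1) j found
    else twoPtr vals i (j - 1) found
  else found
termination_by j - i

def has_negatives_alt (a : List Int) : List Int :=
  let vals := PySem.List.sorted (PySem.Set.ofList a) (fun x => x) false
  let found := twoPtr vals 0 (vals.length - 1) PySem.Set.empty
  a.filter (fun x => decide (x ∈ found))

-- ===== PRECONDITION & SPEC =====
def Spec_has_negatives (a : List Int) (out : List Int) : Prop := out = has_negatives_alt a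
instance (a : List Int) (out : List Int) : Decidable (Spec_has_negatives a out) := by unfold Spec_has_negatives; infer_instance

-- ===== CLAIM (what is proved, stated in full; the proofs are below) =====
def Claim_equal_has_negatives : Prop := ∀ (a : List Int), Dom_has_negatives a → Spec_has_negatives a (has_negatives a)

-- ===== LEMMAS AND PROOFS =====

-- A's dict after the first loop contains exactly the positive keys whose negation occurs in the list
lemma hnStep_contains (l : List Int) (d : PySem.Dict Int Int) (k : Int)
    (hpos : ∀ j, d.contains j = true → 0 < j) :
    (l.foldl hnStep d).contains k = (d.contains k || decide (0 < k ∧ -k ∈ l)) := by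
  induction l generalizing d with
  | nil => simp
  | cons x l ih =>
    simp only [List.foldl_cons]
    by_cases hx : x < 0
    · have hcx : d.contains x = false := by
        cases h : d.contains x
        · rfl
        · exact absurd (hpos x h) (by omega)
      have hstep : hnStep d x = d.insert |x| x := by
        simp [hnStep, hcx, hx]
      rw [hstep, ih]
      · simp only [PySem.Dict.contains_insert, List.mem_cons]
        by_cases hk : k = -x
        · subst hk
          have hbeq : (-x == |x|) = true := by simp [abs_of_neg hx]
          simp [hbeq, hx]
        · have h1 : (k == |x|) = false := by
            rw [abs_of_neg hx]; exact beq_eq_false_iff_ne.mpr hk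
          have h2 : ¬(-k = x) := fun h => hk (by omega)
          simp [h1, h2]
      · intro j hj
        rw [PySem.Dict.contains_insert] at hj
        rcases Bool.or_eq_true_iff.mp hj with h | h
        · have : j = |x| := by simpa using h
          subst this; exact abs_pos.mpr (by omega)
        · exact hpos j h
    · have hstep : hnStep d x = d := by simp [hnStep, hx]
      rw [hstep, ih d hpos]
      congr 1
      simp only [List.mem_cons, decide_eq_decide]
      constructor
      · rintro ⟨h1, h2⟩; exact ⟨h1, Or.inr h2⟩
      · rintro ⟨h1, h2 | h2⟩
        · exact absurd (show x < 0 by omega) hx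
        · exact ⟨h1, h2⟩

-- B's two-pointer sweep: membership in the result, for strictly increasing vals
lemma twoPtr_mem (vals : List Int) (hs : vals.Pairwise (· < ·)) (i j : Nat)
    (hj : j < vals.length) (found : PySem.Set Int) (x : Int) :
    x ∈ twoPtr vals i j found ↔
      x ∈ found ∨ ∃ k l, i ≤ k ∧ k < l ∧ l ≤ j ∧ vals.getD k 0 = -x ∧ vals.getD l 0 = x := by
  have hmono : ∀ (p q : Nat), p < q → q < vals.length → vals.getD p 0 < vals.getD q 0 := by
    intro p q hpq hq
    rw [List.getD_eq_getElem _ _ (by omega), List.getD_eq_getElem _ _ hq]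
    exact List.pairwise_iff_getElem.mp hs p q (by omega) hq hpq
  induction hfuel : j - i using Nat.strong_induction_on generalizing i j found with
  | _ fuel ih =>
  by_cases hij : i < j
  · have hi : i < vals.length := by omega
    set vi := vals.getD i 0 with hvi
    set vj := vals.getD j 0 with hvj
    by_cases hsum : vi + vj = 0
    · rw [show twoPtr vals i j found = twoPtr vals (i+1) (j-1) (found.add vj) by
        rw [twoPtr]; simp only [if_pos hij]; rw [if_pos hsum]]
      have H := ih (j - 1 - (i + 1)) (by omega) (i+1) (j-1) (by omega) (found.add vj) rfl
      refine Iff.trans H ?_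
      rw [PySem.Set.mem_add]
      constructor
      · rintro (⟨h | h⟩ | ⟨k, l, h1, h2, h3, h4, h5⟩)
        · exact Or.inl h
        · exact Or.inr ⟨i, j, le_refl i, hij, le_refl j, by omega, h.symm⟩
        · exact Or.inr ⟨k, l, by omega, h2, by omega, h4, h5⟩
      · rintro (h | ⟨k, l, h1, h2, h3, h4, h5⟩)
        · exact Or.inl (Or.inl h)
        · -- if the pair touches i or j it is (i,j); otherwise it is inside
          by_cases hl : l = j
          · subst hl
            have hki : k = i := by
              by_contra hk
              have : vals.getD k 0 > vi := hmono i k (by omega) (by omega)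
              omega
            exact Or.inl (Or.inr (by omega))
          · have hlj : l < j := by omega
            by_cases hk : k = i
            · subst hk
              have : vals.getD l 0 < vj := hmono l j hlj hj
              omega
            · exact Or.inr ⟨k, l, by omega, h2, by omega, h4, h5⟩
    · by_cases hlt : vi + vj < 0
      · rw [show twoPtr vals i j found = twoPtr vals (i+1) j found by
          rw [twoPtr]; simp only [if_pos hij]; rw [if_neg hsum, if_pos hlt]]
        have H := ih (j - (i + 1)) (by omega) (i+1) j hj found rfl
        refine Iff.trans H ?_
        constructor
        · rintro (h | ⟨k, l, h1, h2, h3, h4, h5⟩)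
          · exact Or.inl h
          · exact Or.inr ⟨k, l, by omega, h2, h3, h4, h5⟩
        · rintro (h | ⟨k, l, h1, h2, h3, h4, h5⟩)
          · exact Or.inl h
          · refine Or.inr ⟨k, l, ?_, h2, h3, h4, h5⟩
            by_contra hk
            have hki : k = i := by omega
            subst hki
            have : vals.getD l 0 ≤ vj := by
              by_cases hlj : l = j
              · subst hlj; omega
              · exact le_of_lt (hmono l j (by omega) hj)
            omega
      · rw [show twoPtr vals i j found = twoPtr vals i (j-1) found by
          rw [twoPtr]; simp only [if_pos hij]; rw [if_neg hsum, if_neg hlt]]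
        have H := ih (j - 1 - i) (by omega) i (j-1) (by omega) found rfl
        refine Iff.trans H ?_
        constructor
        · rintro (h | ⟨k, l, h1, h2, h3, h4, h5⟩)
          · exact Or.inl h
          · exact Or.inr ⟨k, l, h1, h2, by omega, h4, h5⟩
        · rintro (h | ⟨k, l, h1, h2, h3, h4, h5⟩)
          · exact Or.inl h
          · refine Or.inr ⟨k, l, h1, h2, ?_, h4, h5⟩
            by_contra hl
            have hlj : l = j := by omega
            subst hlj
            have : vi ≤ vals.getD k 0 := by
              by_cases hki : k = i
              · subst hki; omega
              · exact le_of_lt (hmono i k (by omega) (by omega))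
            omega
  · rw [show twoPtr vals i j found = found by rw [twoPtr]; simp [hij]]
    constructor
    · exact Or.inl
    · rintro (h | ⟨k, l, h1, h2, h3, _, _⟩)
      · exact h
      · omega

-- strict sortedness turns index pairs into value membership
lemma twoPtr_full (vals : List Int) (hs : vals.Pairwise (· < ·)) (hne : vals ≠ []) (x : Int) :
    x ∈ twoPtr vals 0 (vals.length - 1) PySem.Set.empty ↔ (0 < x ∧ x ∈ vals ∧ -x ∈ vals) := by
  have hlen : 0 < vals.length := List.length_pos_iff.mpr hne
  rw [twoPtr_mem vals hs 0 (vals.length - 1) (by omega) PySem.Set.empty x]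
  constructor
  · rintro (h | ⟨k, l, h1, h2, h3, h4, h5⟩)
    · simp [PySem.Set.empty] at h
    · have hk : k < vals.length := by omega
      have hl : l < vals.length := by omega
      have hlt : vals.getD k 0 < vals.getD l 0 := by
        rw [List.getD_eq_getElem _ _ hk, List.getD_eq_getElem _ _ hl]
        exact List.pairwise_iff_getElem.mp hs k l hk hl h2
      refine ⟨by omega, ?_, ?_⟩
      · rw [← h5, List.getD_eq_getElem _ _ hl]; exact List.getElem_mem hl
      · rw [← h4, List.getD_eq_getElem _ _ hk]; exact List.getElem_mem hk
  · rintro ⟨hx, hmem, hnmem⟩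
    obtain ⟨l, hl, hvl⟩ := List.getElem_of_mem hmem
    obtain ⟨k, hk, hvk⟩ := List.getElem_of_mem hnmem
    have hkl : k < l := by
      by_contra h
      have hle : l ≤ k := by omega
      have : vals[l] ≤ vals[k] := by
        rcases Nat.lt_or_ge l k with h' | h'
        · exact le_of_lt (List.pairwise_iff_getElem.mp hs l k hl hk h')
        · have : l = k := by omega
          subst this; exact le_refl _
      omega
    refine Or.inr ⟨k, l, by omega, hkl, by omega, ?_, ?_⟩
    · rw [List.getD_eq_getElem _ _ hk, hvk]
    · rw [List.getD_eq_getElem _ _ hl, hvl]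

-- ===== VERDICT (by name: the statement is the Claim_ definition above) =====
theorem has_negatives_spec : Claim_equal_has_negatives := by
  intro a _
  unfold Spec_has_negatives has_negatives has_negatives_alt
  rw [PySem.List.foldl_append_if_eq_filter]
  simp only [List.nil_append]
  cases ha : a with
  | nil => simp
  | cons y ys =>
    rw [← ha]
    apply List.filter_congr
    intro x hx
    rw [hnStep_contains a PySem.Dict.empty x (by simp)]
    have hne : PySem.List.sorted (PySem.Set.ofList a) (fun x => x) false ≠ [] := by
      rw [Ne, PySem.List.sorted_eq_nil_iff]
      intro h
      have : (x : Int) ∈ PySem.Set.ofList a := (PySem.Set.mem_ofList a x).mpr hx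
      simp [h] at this
    rw [show (decide (x ∈ twoPtr (PySem.List.sorted (PySem.Set.ofList a) (fun x => x) false) 0
        ((PySem.List.sorted (PySem.Set.ofList a) (fun x => x) false).length - 1) PySem.Set.empty)) =
        decide (0 < x ∧ x ∈ a ∧ -x ∈ a) from ?_]
    · simp [hx]
    · simp only [decide_eq_decide]
      rw [twoPtr_full _ (PySem.List.sorted_ofList_pairwise_lt a) hne x]
      simp [PySem.List.mem_sorted, PySem.Set.mem_ofList]
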